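-- pv_equiv track=rewrite | github.com/Rics2026/Rics | bot.py | _strip_action_block
-- ===== SOURCE A (Python) =====
-- def _strip_action_block(answer: str) -> str:
--     action_keys = {"action:", "date:", "time:", "text:", "channel:",
--                    "message:", "target:", "query:", "file:", "run:"}
--     lines = answer.splitlines()
--     clean, in_action = [], False
--     for line in lines:
--         low = line.strip().lower()
--         if low.startswith("action:"):
--             in_action = True
--         if in_action and any(low.startswith(k) for k in action_keys):
--             continue
--         clean.append(line)
--     return "\n".join(clean).strip()
-- ===== SOURCE B (Python) =====
-- def _strip_action_block(answer: str) -> str: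
--     action_keys = {"action:", "date:", "time:", "text:", "channel:",
--                    "message:", "target:", "query:", "file:", "run:"}
--     lines = answer.splitlines()
--     i = next((idx for idx, line in enumerate(lines)
--               if line.strip().lower().startswith("action:")), None)
--     if i is None:
--         return "\n".join(lines).strip()
--     kept = lines[:i] + [line for line in lines[i:]
--                         if not any(line.strip().lower().startswith(k)
--                                    for k in action_keys)]
--     return "\n".join(kept).strip()
-- ===== Notes on version B (the rewrite author's own statement) =====
-- stated objective: alternative
-- what changed: Replaces A's stateful flag loop with a two-phase decomposition: first find the index of the first action line, then keep the prefix verbatim and filter only the suffix by the key set.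
import Mathlib
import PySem

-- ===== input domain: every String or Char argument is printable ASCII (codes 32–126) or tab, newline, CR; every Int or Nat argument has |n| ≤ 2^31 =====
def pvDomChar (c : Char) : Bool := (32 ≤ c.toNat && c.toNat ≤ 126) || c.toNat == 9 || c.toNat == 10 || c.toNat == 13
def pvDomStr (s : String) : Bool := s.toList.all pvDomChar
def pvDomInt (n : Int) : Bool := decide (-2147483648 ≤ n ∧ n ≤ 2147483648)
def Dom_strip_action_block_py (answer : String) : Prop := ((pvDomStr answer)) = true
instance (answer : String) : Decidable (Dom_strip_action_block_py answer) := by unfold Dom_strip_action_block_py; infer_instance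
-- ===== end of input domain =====

-- B restructures A's one-pass flag loop into find-first-action-index + untouched prefix + filtered suffix; same result, similar cost (objective: alternative).

-- ===== PORT A =====
-- the action_keys set (iterated only through `any`, so order is irrelevant)
def pvKeys : List String := ["action:", "date:", "time:", "text:", "channel:",
                             "message:", "target:", "query:", "file:", "run:"]
-- low = line.strip().lower(); low.startswith("action:")
def pvIsAct (line : String) : Bool :=
  PySem.Str.startswith (PySem.Str.lower (PySem.Str.strip line)) "action:"
-- any(low.startswith(k) for k in action_keys)
def pvPred (line : String) : Bool :=
  pvKeys.any (fun k => PySem.Str.startswith (PySem.Str.lower (PySem.Str.strip line)) k)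

-- A's loop over lines with accumulator `clean` and flag `in_action`
def pvLoopA : List String → List String → Bool → List String
  | [], clean, _ => clean
  | line :: rest, clean, inAction =>
      let inAction' := inAction || pvIsAct line
      if inAction' && pvPred line then
        pvLoopA rest clean inAction'
      else
        pvLoopA rest (clean ++ [line]) inAction'

def strip_action_block_py (answer : String) : String :=
  PySem.Str.strip (PySem.Str.join "\n" (pvLoopA (PySem.Str.splitlines answer) [] false))

-- ===== PORT B =====
def strip_action_block_py_alt (answer : String) : String :=
  let lines := PySem.Str.splitlines answer
  match lines.findIdx? pvIsAct with
  | none => PySem.Str.strip (PySem.Str.join "\n" lines)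
  | some i =>
      PySem.Str.strip (PySem.Str.join "\n"
        (lines.take i ++ (lines.drop i).filter (fun l => !pvPred l)))

-- ===== PRECONDITION & SPEC =====
def Spec_strip_action_block_py (answer : String) (out : String) : Prop := out = strip_action_block_py_alt answer
instance (answer : String) (out : String) : Decidable (Spec_strip_action_block_py answer out) := by unfold Spec_strip_action_block_py; infer_instance

-- ===== CLAIM (what is proved, stated in full; the proofs are below) =====
def Claim_equal_strip_action_block_py : Prop := ∀ (answer : String), Dom_strip_action_block_py answer → Spec_strip_action_block_py answer (strip_action_block_py answer)

-- ===== LEMMAS AND PROOFS =====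
theorem pvIsAct_pred {l : String} (h : pvIsAct l = true) : pvPred l = true := by
  simp [pvPred, pvKeys, pvIsAct] at *
  exact Or.inl h

theorem pvLoopA_true (ls clean) :
    pvLoopA ls clean true = clean ++ ls.filter (fun l => !pvPred l) := by
  induction ls generalizing clean with
  | nil => simp [pvLoopA]
  | cons l rest ih =>
    by_cases h : pvPred l = true
    · simp [pvLoopA, h, ih]
    · simp at h
      simp [pvLoopA, h, ih]

theorem pvLoopA_false (ls clean) :
    pvLoopA ls clean false =
      clean ++ (match ls.findIdx? pvIsAct with
                | none => ls
                | some i => ls.take i ++ (ls.drop i).filter (fun l => !pvPred l)) := by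
  induction ls generalizing clean with
  | nil => simp [pvLoopA]
  | cons l rest ih =>
    by_cases h : pvIsAct l = true
    · have hp := pvIsAct_pred h
      simp [pvLoopA, h, hp, pvLoopA_true, List.findIdx?_cons]
    · simp at h
      rw [show pvLoopA (l :: rest) clean false
            = pvLoopA rest (clean ++ [l]) false by simp [pvLoopA, h]]
      rw [ih]
      cases hf : rest.findIdx? pvIsAct with
      | none => simp [List.findIdx?_cons, h, hf]
      | some i => simp [List.findIdx?_cons, h, hf]

-- ===== VERDICT (by name: the statement is the Claim_ definition above) =====
theorem strip_action_block_py_spec : Claim_equal_strip_action_block_py := by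
  intro answer _
  unfold Spec_strip_action_block_py strip_action_block_py strip_action_block_py_alt
  rw [pvLoopA_false]
  cases h : (PySem.Str.splitlines answer).findIdx? pvIsAct <;> simp [h]
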